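-- pv_equiv track=rewrite | github.com/jpinsonault/imdb_gpt | scripts/image_siren/recon_logger.py | _best_nrow
-- ===== SOURCE A (Python) =====
-- def _best_nrow(num_pairs: int) -> int:
--     n = max(2 * int(num_pairs), 2)
--     best_nrow = 2
--     best_score = None
--
--     for nrow in range(2, n + 1, 2):
--         rows = (n + nrow - 1) // nrow
--         score = abs(rows - nrow)
--         if best_score is None or score < best_score:
--             best_score = score
--             best_nrow = nrow
--
--     return best_nrow
-- ===== SOURCE B (Python) =====
-- def _best_nrow(num_pairs: int) -> int:
--     n = max(2 * num_pairs, 2)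
--     # Binary search for the largest j in [1, n//2] with n > 2j*(2j-1),
--     # i.e. the largest even nrow = 2j with ceil(n/nrow) >= nrow.
--     lo, hi = 1, n // 2
--     while lo < hi:
--         mid = (lo + hi + 1) // 2
--         if n > 2 * mid * (2 * mid - 1):
--             lo = mid
--         else:
--             hi = mid - 1
--     k = 2 * lo
--     if k + 2 > n:
--         return k
--     # |rows - nrow| is strictly decreasing up to k and strictly increasing
--     # from k + 2 on, so the minimum (earliest on ties) is at k or k + 2.
--     if abs((n + k - 1) // k - k) <= abs((n + k + 1) // (k + 2) - (k + 2)):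
--         return k
--     return k + 2
-- ===== Notes on version B (the rewrite author's own statement) =====
-- stated objective: faster
-- what changed: Replaces the linear scan over all even nrow with a binary search for the crossover point of the strictly decreasing score ceil(n/nrow)-nrow, then compares the two candidate even values around it (earlier one on ties).
import Mathlib
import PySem

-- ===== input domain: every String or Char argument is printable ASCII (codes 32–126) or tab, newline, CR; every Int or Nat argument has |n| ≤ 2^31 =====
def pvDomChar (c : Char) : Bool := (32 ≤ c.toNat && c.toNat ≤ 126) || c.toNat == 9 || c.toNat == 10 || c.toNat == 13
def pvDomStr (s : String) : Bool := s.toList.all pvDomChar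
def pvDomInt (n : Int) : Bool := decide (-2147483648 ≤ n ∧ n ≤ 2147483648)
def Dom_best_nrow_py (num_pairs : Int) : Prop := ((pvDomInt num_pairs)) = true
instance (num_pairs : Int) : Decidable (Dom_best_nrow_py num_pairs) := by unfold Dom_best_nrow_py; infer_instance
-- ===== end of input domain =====

-- B replaces A's linear scan over all even nrow by an O(log n) binary search for the
-- crossover of the strictly decreasing ceil(n/nrow)-nrow, then compares the two candidates.

-- ===== PORT A =====
-- one loop iteration of A's for-loop (state = (best_nrow, best_score))
def aStep (n : Int) (st : Int × Option Int) (nrow : Int) : Int × Option Int :=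
  let rows := PySem.Int.floordiv (n + nrow - 1) nrow
  let score := |rows - nrow|
  match st.2 with
  | none => (nrow, some score)
  | some bs => if score < bs then (nrow, some score) else st

def best_nrow_py (num_pairs : Int) : Int :=
  let n := max (2 * num_pairs) 2
  ((PySem.List.pyRange 2 (n + 1) 2).foldl (aStep n) (2, none)).1

-- ===== PORT B =====
-- termination measures for the binary search's while-loop (cited by the port's decreasing_by)
theorem bnSearch_dec1 (lo hi : Int) (h : lo < hi) :
    (hi - PySem.Int.floordiv (lo + hi + 1) 2).toNat < (hi - lo).toNat := by
  have h1 : lo + 1 ≤ PySem.Int.floordiv (lo + hi + 1) 2 :=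
    (PySem.Int.le_floordiv_iff_mul_le two_pos).2 (by linarith)
  exact (Int.toNat_lt_toNat (by linarith)).2 (by linarith)

theorem bnSearch_dec2 (lo hi : Int) (h : lo < hi) :
    (PySem.Int.floordiv (lo + hi + 1) 2 - 1 - lo).toNat < (hi - lo).toNat := by
  have h2 : PySem.Int.floordiv (lo + hi + 1) 2 < hi + 1 :=
    (PySem.Int.floordiv_lt_iff_lt_mul two_pos).2 (by linarith)
  exact (Int.toNat_lt_toNat (by linarith)).2 (by linarith)

-- Source B's while-loop: binary search for the largest j in [lo, hi] with n > 2j*(2j-1)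
def bnSearch (n lo hi : Int) : Int :=
  if h : lo < hi then
    let mid := PySem.Int.floordiv (lo + hi + 1) 2
    if n > 2 * mid * (2 * mid - 1) then bnSearch n mid hi
    else bnSearch n lo (mid - 1)
  else lo
termination_by (hi - lo).toNat
decreasing_by
  · exact bnSearch_dec1 lo hi h
  · exact bnSearch_dec2 lo hi h

def best_nrow_py_alt (num_pairs : Int) : Int :=
  let n := max (2 * num_pairs) 2
  let lo := bnSearch n 1 (PySem.Int.floordiv n 2)
  let k := 2 * lo
  if k + 2 > n then k
  else if |PySem.Int.floordiv (n + k - 1) k - k| ≤ |PySem.Int.floordiv (n + k + 1) (k + 2) - (k + 2)| then k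
  else k + 2

-- ===== PRECONDITION & SPEC =====
def Spec_best_nrow_py (num_pairs : Int) (out : Int) : Prop := out = best_nrow_py_alt num_pairs
instance (num_pairs : Int) (out : Int) : Decidable (Spec_best_nrow_py num_pairs out) := by unfold Spec_best_nrow_py; infer_instance

-- ===== CLAIM (what is proved, stated in full; the proofs are below) =====
def Claim_equal_best_nrow_py : Prop := ∀ (num_pairs : Int), Dom_best_nrow_py num_pairs → Spec_best_nrow_py num_pairs (best_nrow_py num_pairs)

-- ===== LEMMAS AND PROOFS =====

-- f n k = ceil(n/k) - k, the (signed) score of an even candidate k; g = |f|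
def fv (n k : Int) : Int := PySem.Int.floordiv (n + k - 1) k - k
def gv (n k : Int) : Int := |fv n k|

lemma pr2_nil (a b : Int) (h : b ≤ a) : PySem.List.pyRange a b 2 = [] := by
  rw [PySem.List.pyRange_of_pos a b (by norm_num)]
  simp [show ¬ a < b by omega]

lemma pr2_cons (a b : Int) (h : a < b) : PySem.List.pyRange a b 2 = a :: PySem.List.pyRange (a + 2) b 2 := by
  rw [PySem.List.pyRange_of_pos a b (by norm_num), PySem.List.pyRange_of_pos (a + 2) b (by norm_num)]
  by_cases h2 : a + 2 < b
  · have he : ((b - a + 2 - 1) / 2).toNat = ((b - (a + 2) + 2 - 1) / 2).toNat + 1 := by omega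
    rw [if_pos h, if_pos h2, he, List.range_succ_eq_map]
    simp [List.map_map, Function.comp]
    intro k _; ring
  · have he : ((b - a + 2 - 1) / 2).toNat = 1 := by omega
    rw [if_pos h, if_neg h2, he]
    simp

lemma aStep_none (n b x : Int) : aStep n (b, none) x = (x, some (gv n x)) := by
  simp [aStep, gv, fv]

lemma aStep_some_lt (n b s x : Int) (h : gv n x < s) : aStep n (b, some s) x = (x, some (gv n x)) := by
  simp only [aStep, gv, fv] at *
  simp [h]

lemma aStep_some_ge (n b s x : Int) (h : ¬ gv n x < s) : aStep n (b, some s) x = (b, some s) := by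
  simp only [aStep, gv, fv] at *
  simp [h]

-- ceiling division is antitone in the divisor
lemma ceil_anti (n k : Int) (hn : 1 ≤ n) (hk : 2 ≤ k) :
    PySem.Int.floordiv (n + k + 1) (k + 2) ≤ PySem.Int.floordiv (n + k - 1) k := by
  set q := PySem.Int.floordiv (n + k + 1) (k + 2) with hq
  have hq1 : 1 ≤ q := by
    rw [hq, PySem.Int.le_floordiv_iff_mul_le (by omega)]; nlinarith
  have hq2 : q * (k + 2) ≤ n + k + 1 := by
    have := (PySem.Int.le_floordiv_iff_mul_le (a := n + k + 1) (b := k + 2) (q := q) (by omega)).1 le_rfl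
    exact this
  rw [PySem.Int.le_floordiv_iff_mul_le (by omega)]
  nlinarith

lemma f_step (n k : Int) (hn : 1 ≤ n) (hk : 2 ≤ k) : fv n (k + 2) ≤ fv n k - 2 := by
  have h := ceil_anti n k hn hk
  unfold fv
  have : n + (k + 2) - 1 = n + k + 1 := by ring
  rw [this]
  linarith

lemma f_mono (n : Int) (hn : 1 ≤ n) :
    ∀ d (k k' : Int), (k' - k).toNat = d → 2 ≤ k → k ≤ k' → 2 ∣ k' - k → fv n k' ≤ fv n k := by
  intro d
  induction d using Nat.strong_induction_on with
  | _ d ih =>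
    intro k k' hd hk hkk hdvd
    rcases eq_or_lt_of_le hkk with he | hlt
    · subst he; rfl
    · have hk2 : k + 2 ≤ k' := by omega
      have h1 : fv n k' ≤ fv n (k + 2) :=
        ih (k' - (k + 2)).toNat (by omega) (k + 2) k' rfl (by omega) hk2 (by omega)
      have h2 := f_step n k hn hk
      linarith

lemma pred_iff (n k : Int) (hk : 1 ≤ k) : 0 ≤ fv n k ↔ k * (k - 1) < n := by
  unfold fv
  rw [sub_nonneg, PySem.Int.le_floordiv_iff_mul_le (by omega)]
  constructor <;> intro h <;> nlinarith

-- folding over a tail where no element improves the score leaves the state unchanged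
lemma fold_stay (n : Int) :
    ∀ d (m b s : Int), (n + 1 - m).toNat = d →
    (∀ x, m ≤ x → x ≤ n → 2 ∣ x - m → ¬ gv n x < s) →
    (PySem.List.pyRange m (n + 1) 2).foldl (aStep n) (b, some s) = (b, some s) := by
  intro d
  induction d using Nat.strong_induction_on with
  | _ d ih =>
    intro m b s hd hno
    by_cases hm : n + 1 ≤ m
    · rw [pr2_nil _ _ hm]; rfl
    · rw [pr2_cons _ _ (by omega)]
      simp only [List.foldl_cons]
      rw [aStep_some_ge n b s m (hno m le_rfl (by omega) (by omega))]
      exact ih (n + 1 - (m + 2)).toNat (by omega) (m + 2) b s rfl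
        (fun x h1 h2 h3 => hno x (by omega) h2 (by omega))

-- the crossover answer
def ansK (n K : Int) : Int :=
  if n < K + 2 then K else if gv n K ≤ gv n (K + 2) then K else K + 2

-- the main loop invariant: from any k in the descending region the fold lands on ansK
lemma fold_run (n K : Int) (hn2 : 2 ≤ n) (hK2 : 2 ≤ K) (hKn : K ≤ n) (hKd : 2 ∣ K)
    (hKf : 0 ≤ fv n K) (hKmax : ∀ x, K < x → x ≤ n → 2 ∣ x → fv n x < 0) :
    ∀ d (k : Int), (K - k).toNat = d → 2 ≤ k → k ≤ K → 2 ∣ k →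
    ((PySem.List.pyRange (k + 2) (n + 1) 2).foldl (aStep n) (k, some (gv n k))).1 = ansK n K := by
  intro d
  induction d using Nat.strong_induction_on with
  | _ d ih =>
    intro k hd hk2 hkK hkd
    rcases eq_or_lt_of_le hkK with he | hlt
    · subst he
      by_cases hend : n < k + 2
      · rw [pr2_nil _ _ (by omega)]
        simp [ansK, hend]
      · push Not at hend
        have hK2n : k + 2 ≤ n := by omega
        have hfneg : fv n (k + 2) < 0 := hKmax (k + 2) (by omega) hK2n (by omega)
        rw [pr2_cons _ _ (by omega)]
        simp only [List.foldl_cons]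
        by_cases hlt2 : gv n (k + 2) < gv n k
        · rw [aStep_some_lt n k (gv n k) (k + 2) hlt2]
          rw [fold_stay n (n + 1 - (k + 2 + 2)).toNat (k + 2 + 2) (k + 2) (gv n (k + 2)) rfl ?_]
          · simp [ansK, show ¬ n < k + 2 by omega, show ¬ gv n k ≤ gv n (k + 2) by omega]
          · intro x h1 h2 h3
            have hx : fv n x < 0 := hKmax x (by omega) h2 (by omega)
            have hmono : fv n x ≤ fv n (k + 2) :=
              f_mono n (by omega) (x - (k + 2)).toNat (k + 2) x rfl (by omega) (by omega) (by omega)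
            simp only [gv]
            rw [abs_of_neg hx, abs_of_neg hfneg]
            omega
        · rw [aStep_some_ge n k (gv n k) (k + 2) hlt2]
          rw [fold_stay n (n + 1 - (k + 2 + 2)).toNat (k + 2 + 2) k (gv n k) rfl ?_]
          · simp [ansK, show ¬ n < k + 2 by omega, show gv n k ≤ gv n (k + 2) by omega]
          · intro x h1 h2 h3
            have hx : fv n x < 0 := hKmax x (by omega) h2 (by omega)
            have hmono : fv n x ≤ fv n (k + 2) :=
              f_mono n (by omega) (x - (k + 2)).toNat (k + 2) x rfl (by omega) (by omega) (by omega)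
            have : gv n (k + 2) ≤ gv n x := by
              simp only [gv]; rw [abs_of_neg hx, abs_of_neg hfneg]; omega
            omega
    · -- k < K: the next candidate strictly improves
      have hk2K : k + 2 ≤ K := by omega
      have hfk : 0 ≤ fv n (k + 2) := by
        have := f_mono n (by omega) (K - (k + 2)).toNat (k + 2) K rfl (by omega) hk2K (by omega)
        linarith
      have hfk' : fv n (k + 2) ≤ fv n k - 2 := f_step n k (by omega) hk2
      have himp : gv n (k + 2) < gv n k := by
        simp only [gv]
        rw [abs_of_nonneg hfk, abs_of_nonneg (by linarith : (0:Int) ≤ fv n k)]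
        omega
      rw [pr2_cons _ _ (by omega)]
      simp only [List.foldl_cons]
      rw [aStep_some_lt n k (gv n k) (k + 2) himp]
      exact ih (K - (k + 2)).toNat (by omega) (k + 2) rfl (by omega) hk2K (by omega)

-- binary-search correctness
lemma bnSearch_spec (n : Int) :
    ∀ d (lo hi : Int), (hi - lo).toNat = d → 1 ≤ lo → lo ≤ hi →
    n > 2 * lo * (2 * lo - 1) → (∀ j, hi < j → ¬ n > 2 * j * (2 * j - 1)) →
    lo ≤ bnSearch n lo hi ∧ bnSearch n lo hi ≤ hi ∧
      n > 2 * bnSearch n lo hi * (2 * bnSearch n lo hi - 1) ∧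
      (∀ j, bnSearch n lo hi < j → ¬ n > 2 * j * (2 * j - 1)) := by
  intro d
  induction d using Nat.strong_induction_on with
  | _ d ih =>
    intro lo hi hd h1 hlh hpl hph
    rw [bnSearch]
    by_cases hlt : lo < hi
    · rw [dif_pos hlt]
      have hmid : lo + 1 ≤ PySem.Int.floordiv (lo + hi + 1) 2 ∧
          PySem.Int.floordiv (lo + hi + 1) 2 ≤ hi := by
        simp only [PySem.Int.floordiv, Int.fdiv_eq_ediv]
        omega
      set mid := PySem.Int.floordiv (lo + hi + 1) 2 with hm
      by_cases hp : n > 2 * mid * (2 * mid - 1)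
      · rw [if_pos hp]
        have := ih (hi - mid).toNat (by omega) mid hi rfl (by omega) (by omega) hp hph
        exact ⟨by omega, this.2.1, this.2.2⟩
      · rw [if_neg hp]
        have hmono : ∀ j, mid - 1 < j → ¬ n > 2 * j * (2 * j - 1) := by
          intro j hj
          by_cases hjh : hi < j
          · exact hph j hjh
          · intro hc
            apply hp
            have hjm : mid ≤ j := by omega
            have h0 : 2 * mid * (2 * mid - 1) ≤ 2 * j * (2 * j - 1) := by nlinarith
            omega
        have := ih ((mid - 1) - lo).toNat (by omega) lo (mid - 1) rfl h1 (by omega) hpl hmono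
        exact ⟨this.1, by omega, this.2.2⟩
    · rw [dif_neg hlt]
      exact ⟨le_rfl, hlh, hpl, fun j hj => hph j (by omega)⟩

-- ===== VERDICT (by name: the statement is the Claim_ definition above) =====
theorem best_nrow_py_spec : Claim_equal_best_nrow_py := by
  intro p _
  simp only [Spec_best_nrow_py, best_nrow_py, best_nrow_py_alt]
  set n := max (2 * p) 2 with hn
  have hn2 : 2 ≤ n := le_max_right _ _
  have hnd : 2 ∣ n := by
    rcases le_or_gt p 1 with h | h
    · have : n = 2 := by omega
      omega
    · have : n = 2 * p := by omega
      omega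
  by_cases hsmall : n = 2
  · -- degenerate case: single candidate 2 on both sides
    have h3 : n + 1 = 3 := by omega
    rw [h3, hsmall]
    rw [pr2_cons 2 3 (by norm_num), pr2_nil (2 + 2) 3 (by norm_num)]
    simp only [List.foldl_cons, List.foldl_nil, aStep_none]
    have hfd : PySem.Int.floordiv 2 2 = 1 := by
      rw [PySem.Int.floordiv_eq_ediv_of_pos (by norm_num)]; rfl
    rw [hfd, bnSearch]
    norm_num
  · have hn4 : 4 ≤ n := by omega
    have hhi : PySem.Int.floordiv n 2 = n / 2 := PySem.Int.floordiv_eq_ediv_of_pos (by norm_num)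
    rw [hhi]
    have hbs := bnSearch_spec n ((n / 2) - 1).toNat 1 (n / 2) (by omega) le_rfl (by omega)
      (by omega)
      (by
        intro j hj hc
        have h2j : n + 2 ≤ 2 * j := by omega
        nlinarith)
    set r := bnSearch n 1 (n / 2) with hr
    obtain ⟨hr1, hrhi, hrp, hrmax⟩ := hbs
    have hKn : 2 * r ≤ n := by omega
    have hKf : 0 ≤ fv n (2 * r) := by
      rw [pred_iff n (2 * r) (by omega)]
      nlinarith
    have hKmax : ∀ x, 2 * r < x → x ≤ n → 2 ∣ x → fv n x < 0 := by
      intro x hx1 hx2 hxd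
      obtain ⟨j, hj⟩ := hxd
      have hnp := hrmax j (by omega)
      push Not at hnp
      by_contra hc
      push Not at hc
      rw [pred_iff n x (by omega)] at hc
      nlinarith
    -- A's fold reaches ansK
    rw [pr2_cons 2 (n + 1) (by omega)]
    simp only [List.foldl_cons, aStep_none]
    rw [fold_run n (2 * r) hn2 (by omega) hKn (by omega) hKf hKmax
      (2 * r - 2).toNat 2 rfl le_rfl (by omega) (by omega)]
    -- ansK matches B's final comparison
    have harg : n + (2 * r + 2) - 1 = n + 2 * r + 1 := by ring
    simp only [ansK, gv, fv, gt_iff_lt, harg]
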